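-- pv_equiv track=rewrite | github.com/Sophiarong/chinese-ner-cnn-bilstm-transformer-bert | loss/calculate_loss.py | ans2region
-- ===== SOURCE A (Python) =====
-- def ans2region(dev_tag_list):
--     """
--     将单句答案转换为区间
--     :param dev_tag_list: 原始的数字序列（标准）
--     :return: “商品 和 服务[0,2,3,0,2]”将返回[(0, 2), (2, 3), (3, 5)]
--     """
--     region = []
--     start = 0
--     for i, num in enumerate(dev_tag_list):
--         if num == 'E' or num == 'S':
--             end = i+1
--             region.append((start, end))
--             start = end
--     return region
-- ===== SOURCE B (Python) =====
-- def ans2region(dev_tag_list):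
--     def first_boundary(tags):
--         for j, t in enumerate(tags):
--             if t == 'E' or t == 'S':
--                 return j
--         return None
--
--     def go(tags, offset):
--         j = first_boundary(tags)
--         if j is None:
--             return []
--         end = offset + j + 1
--         return [(offset, end)] + go(tags[j + 1:], end)
--
--     return go(dev_tag_list, 0)
-- ===== Notes on version B (the rewrite author's own statement) =====
-- stated objective: alternative
-- what changed: Replaces A's single stateful fold with a running start by recursive segment splitting: locate the first boundary tag, emit one region, and recurse on the sliced-off remainder with an advanced offset.
import Mathlib
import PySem

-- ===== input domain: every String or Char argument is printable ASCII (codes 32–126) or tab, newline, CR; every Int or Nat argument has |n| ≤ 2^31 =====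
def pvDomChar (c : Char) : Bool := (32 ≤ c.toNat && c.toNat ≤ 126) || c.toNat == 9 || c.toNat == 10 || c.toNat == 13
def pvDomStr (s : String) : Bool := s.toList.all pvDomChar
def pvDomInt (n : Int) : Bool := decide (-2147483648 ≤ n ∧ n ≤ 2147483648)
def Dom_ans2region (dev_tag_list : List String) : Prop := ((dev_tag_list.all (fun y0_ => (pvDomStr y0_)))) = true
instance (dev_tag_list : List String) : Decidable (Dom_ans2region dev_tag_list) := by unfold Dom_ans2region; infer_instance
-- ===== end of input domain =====

-- B replaces A's single stateful fold (running `start`) by recursive segment splitting: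
-- find the first boundary tag, emit one region, recurse on the remainder (objective: alternative).

-- ===== PORT A =====
def ans2region (dev_tag_list : List String) : List (Int × Int) :=
  ((PySem.List.enumerate dev_tag_list).foldl
    (fun (st : List (Int × Int) × Int) (p : Int × String) =>
      if p.2 = "E" ∨ p.2 = "S" then (st.1 ++ [(st.2, p.1 + 1)], p.1 + 1) else st)
    ([], 0)).1

-- ===== PORT B =====
-- first_boundary: index of the first 'E'/'S' tag, None if there is none
def firstBoundary (tags : List String) : Option Nat :=
  tags.findIdx? (fun t => t = "E" ∨ t = "S")

-- the inner recursive helper go(tags, offset); tags[j+1:] is List.drop (j+1) (exact for this nonneg slice)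
def goRegions (tags : List String) (offset : Int) : List (Int × Int) :=
  match hfb : firstBoundary tags with
  | none => []
  | some j => [(offset, offset + j + 1)] ++ goRegions (tags.drop (j + 1)) (offset + j + 1)
termination_by tags.length
decreasing_by
  have hj : j < tags.length := by
    have := List.findIdx?_eq_some_iff_findIdx_eq.mp hfb
    omega
  simp [List.length_drop]
  omega

def ans2region_alt (dev_tag_list : List String) : List (Int × Int) :=
  goRegions dev_tag_list 0

-- ===== PRECONDITION & SPEC =====
def Spec_ans2region (dev_tag_list : List String) (out : List (Int × Int)) : Prop := out = ans2region_alt dev_tag_list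
instance (dev_tag_list : List String) (out : List (Int × Int)) : Decidable (Spec_ans2region dev_tag_list out) := by unfold Spec_ans2region; infer_instance

-- ===== CLAIM (what is proved, stated in full; the proofs are below) =====
def Claim_equal_ans2region : Prop := ∀ (dev_tag_list : List String), Dom_ans2region dev_tag_list → Spec_ans2region dev_tag_list (ans2region dev_tag_list)

-- ===== LEMMAS AND PROOFS =====

-- generalisation of goRegions with the region start decoupled from the enumeration offset
def hReg (tags : List String) (st off : Int) : List (Int × Int) :=
  match firstBoundary tags with
  | none => []
  | some j => (st, off + j + 1) :: goRegions (tags.drop (j + 1)) (off + j + 1)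

theorem goRegions_eq_hReg (tags : List String) (off : Int) :
    goRegions tags off = hReg tags off off := by
  rw [goRegions, hReg]
  cases firstBoundary tags <;> simp

theorem hReg_cons (x : String) (xs : List String) (st off : Int) :
    hReg (x :: xs) st off =
      if x = "E" ∨ x = "S" then (st, off + 1) :: goRegions xs (off + 1)
      else hReg xs st (off + 1) := by
  by_cases hx : x = "E" ∨ x = "S"
  · have : firstBoundary (x :: xs) = some 0 := by
      simp [firstBoundary, List.findIdx?_cons, hx]
    simp [hReg, this, hx]
  · have h1 : firstBoundary (x :: xs) = (firstBoundary xs).map (· + 1) := by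
      simp [firstBoundary, List.findIdx?_cons, hx]
    simp only [hReg, h1, hx, if_false]
    cases hE : firstBoundary xs with
    | none => simp
    | some j =>
      simp only [Option.map_some]
      have harith : off + (↑(j + 1) : Int) + 1 = off + 1 + ↑j + 1 := by push_cast; ring
      rw [List.drop_succ_cons, harith]

-- loop invariant for A's fold
theorem ans2region_loop (l : List String) (off : Int) (acc : List (Int × Int)) (st : Int) :
    ((PySem.List.enumerate l off).foldl
      (fun (q : List (Int × Int) × Int) (p : Int × String) =>
        if p.2 = "E" ∨ p.2 = "S" then (q.1 ++ [(q.2, p.1 + 1)], p.1 + 1) else q)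
      (acc, st)).1 = acc ++ hReg l st off := by
  induction l generalizing off acc st with
  | nil => simp [hReg, firstBoundary, PySem.List.enumerate_nil]
  | cons x xs ih =>
    rw [PySem.List.enumerate_cons, List.foldl_cons, hReg_cons]
    by_cases h : x = "E" ∨ x = "S"
    · simp only [h, if_pos]
      rw [ih, goRegions_eq_hReg]
      simp
    · simp only [h, if_false]
      rw [ih]

-- ===== VERDICT (by name: the statement is the Claim_ definition above) =====
theorem ans2region_spec : Claim_equal_ans2region := by
  intro l _
  show ans2region l = ans2region_alt l
  unfold ans2region ans2region_alt
  rw [ans2region_loop l 0 [] 0, goRegions_eq_hReg]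
  simp
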